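-- pv_equiv track=rewrite | github.com/pypi-data/pypi-mirror-389 | packages/runbooks/runbooks-1.1.12.tar.gz/runbooks-1.1.12/src/runbooks/common/profile_utils.py | _detect_operation_type
-- ===== SOURCE A (Python) =====
-- from typing import Optional, List, Dict, Any
--
-- def _detect_operation_type(service_name: Optional[str], api_call: Optional[str]) -> Optional[str]:
--     """
--     Detect operation type from AWS service name or API call.
--
--     Auto-detection logic maps AWS services and API calls to appropriate operation types:
--     - Billing services: Cost Explorer (ce), Cost and Usage Reports (cur), Budgets
--     - Management services: Organizations, SSO, Identity Store, IAM
--     - Centralized ops services: CloudWatch, Logs, X-Ray, Lambda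
--     - Operational services: All other AWS services (EC2, S3, RDS, etc.)
--
--     Args:
--         service_name: AWS service name (e.g., 'ce', 'organizations', 'ec2')
--         api_call: AWS API call name (e.g., 'GetCostAndUsage', 'ListAccounts')
--
--     Returns:
--         Operation type string ("billing", "management", "centralised_ops") or None for default
--
--     Example:
--         >>> _detect_operation_type(service_name='ce', api_call=None)
--         'billing'
--         >>> _detect_operation_type(service_name='organizations', api_call='ListAccounts')
--         'management'
--         >>> _detect_operation_type(service_name='ec2', api_call=None)
--         None  # Uses default operational type
--     """
--     # Billing operation detection
--     billing_services = ['ce', 'cur', 'budgets', 'pricing', 'cost-explorer', 'billing-cost-management']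
--     billing_apis = ['GetCostAndUsage', 'GetCostForecast', 'DescribeReportDefinitions',
--                    'GetCostCategories', 'GetSavingsPlansUtilization']
--
--     # Management operation detection
--     management_services = ['organizations', 'sso', 'identitystore', 'iam', 'cloudtrail',
--                           'well-architected', 'core-mcp', 'well-architected-security']
--     management_apis = ['ListAccounts', 'DescribeOrganization', 'ListOrganizationalUnits',
--                       'ListInstancesForAccessPortal', 'GetUser', 'CreateTrail']
--
--     # Centralized operations detection
--     centralised_ops_services = ['cloudwatch', 'logs', 'xray', 'lambda', 'cloudwatch-appsignals',
--                                'lambda-tool', 'terraform-mcp', 'aws-diagram']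
--     centralised_ops_apis = ['PutMetricData', 'GetMetricStatistics', 'DescribeLogGroups',
--                            'GetTraceSummaries', 'Invoke', 'CreateLogGroup']
--
--     # Normalize inputs for comparison
--     service_lower = service_name.lower() if service_name else ""
--     api_lower = api_call if api_call else ""
--
--     # Detection logic with service name priority
--     if service_lower in billing_services or any(api in api_lower for api in billing_apis):
--         return "billing"
--     elif service_lower in management_services or any(api in api_lower for api in management_apis):
--         return "management"
--     elif service_lower in centralised_ops_services or any(api in api_lower for api in centralised_ops_apis):
--         return "operational"  # Maps to CENTRALISED_OPS_PROFILE
--     else: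
--         return None  # Use default operation_type
-- ===== SOURCE B (Python) =====
-- # Rank-based classifier: service ranks in a dict, api patterns in one flat list;
-- # the answer is the MINIMUM matching rank, indexed into a label table.
-- _LABELS = ("billing", "management", "operational")
--
-- _SERVICE_GROUPS = [
--     ['ce', 'cur', 'budgets', 'pricing', 'cost-explorer', 'billing-cost-management'],
--     ['organizations', 'sso', 'identitystore', 'iam', 'cloudtrail',
--      'well-architected', 'core-mcp', 'well-architected-security'],
--     ['cloudwatch', 'logs', 'xray', 'lambda', 'cloudwatch-appsignals',
--      'lambda-tool', 'terraform-mcp', 'aws-diagram'],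
-- ]
-- _API_GROUPS = [
--     ['GetCostAndUsage', 'GetCostForecast', 'DescribeReportDefinitions',
--      'GetCostCategories', 'GetSavingsPlansUtilization'],
--     ['ListAccounts', 'DescribeOrganization', 'ListOrganizationalUnits',
--      'ListInstancesForAccessPortal', 'GetUser', 'CreateTrail'],
--     ['PutMetricData', 'GetMetricStatistics', 'DescribeLogGroups',
--      'GetTraceSummaries', 'Invoke', 'CreateLogGroup'],
-- ]
--
-- _SERVICE_RANK = {s: r for r, group in enumerate(_SERVICE_GROUPS) for s in group}
-- _API_PATTERNS = [(a, r) for r, group in enumerate(_API_GROUPS) for a in group]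
--
--
-- def _detect_operation_type(service_name, api_call):
--     service_lower = service_name.lower() if service_name else ""
--     api_lower = api_call if api_call else ""
--     rank = _SERVICE_RANK.get(service_lower, 3)
--     for pattern, r in _API_PATTERNS:
--         if pattern in api_lower:
--             rank = min(rank, r)
--     return _LABELS[rank] if rank < 3 else None
-- ===== Notes on version B (the rewrite author's own statement) =====
-- stated objective: alternative
-- what changed: Replaces the ordered if/elif chain of category checks by a rank computation: a service-to-rank dict lookup plus a single flat pass over (api-pattern, rank) pairs taking the minimum matching rank, then indexing a label table (None at rank 3).
import Mathlib
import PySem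

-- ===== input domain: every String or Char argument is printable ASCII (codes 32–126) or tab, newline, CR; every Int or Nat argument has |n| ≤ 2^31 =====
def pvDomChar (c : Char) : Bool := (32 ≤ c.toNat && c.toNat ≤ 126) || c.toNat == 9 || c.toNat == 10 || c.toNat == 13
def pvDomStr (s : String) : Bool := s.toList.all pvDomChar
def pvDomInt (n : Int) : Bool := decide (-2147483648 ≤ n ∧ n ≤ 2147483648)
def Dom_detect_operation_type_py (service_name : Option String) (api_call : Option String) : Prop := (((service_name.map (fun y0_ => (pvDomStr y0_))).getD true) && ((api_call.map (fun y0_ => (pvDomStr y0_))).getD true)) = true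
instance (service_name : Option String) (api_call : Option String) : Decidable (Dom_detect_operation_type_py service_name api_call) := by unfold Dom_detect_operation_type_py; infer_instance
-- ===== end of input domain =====

-- B replaces the ordered if/elif category chain by a rank computation (service-rank dict + flat min over api-pattern ranks, then a label-table index); alternative decomposition, same cost.


-- ===== PORT A =====
def detect_operation_type_py (service_name : Option String) (api_call : Option String) : Option String :=
  let billing_services : List String := ["ce", "cur", "budgets", "pricing", "cost-explorer", "billing-cost-management"]
  let billing_apis : List String := ["GetCostAndUsage", "GetCostForecast", "DescribeReportDefinitions",
    "GetCostCategories", "GetSavingsPlansUtilization"]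
  let management_services : List String := ["organizations", "sso", "identitystore", "iam", "cloudtrail",
    "well-architected", "core-mcp", "well-architected-security"]
  let management_apis : List String := ["ListAccounts", "DescribeOrganization", "ListOrganizationalUnits",
    "ListInstancesForAccessPortal", "GetUser", "CreateTrail"]
  let centralised_ops_services : List String := ["cloudwatch", "logs", "xray", "lambda", "cloudwatch-appsignals",
    "lambda-tool", "terraform-mcp", "aws-diagram"]
  let centralised_ops_apis : List String := ["PutMetricData", "GetMetricStatistics", "DescribeLogGroups",
    "GetTraceSummaries", "Invoke", "CreateLogGroup"]
  -- 'service_name.lower() if service_name else ""' (None and "" are both falsy)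
  let service_lower : String := match service_name with
    | some s => if s.isEmpty then "" else PySem.Str.lower s
    | none => ""
  -- 'api_call if api_call else ""'
  let api_lower : String := match api_call with
    | some s => if s.isEmpty then "" else s
    | none => ""
  if billing_services.contains service_lower || billing_apis.any (fun api => PySem.Str.isIn api api_lower) then
    some "billing"
  else if management_services.contains service_lower || management_apis.any (fun api => PySem.Str.isIn api api_lower) then
    some "management"
  else if centralised_ops_services.contains service_lower || centralised_ops_apis.any (fun api => PySem.Str.isIn api api_lower) then
    some "operational"
  else
    none

-- ===== PORT B =====
-- B-side data: the three service groups and api groups, in rank order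
-- Python's enumerate(l): pairs (index, element)
def pvEnumerate {A : Type} (l : List A) : List (Nat × A) := (List.range l.length).zip l

def pvLabels : List String := ["billing", "management", "operational"]

def pvServiceGroups : List (List String) :=
  [ ["ce", "cur", "budgets", "pricing", "cost-explorer", "billing-cost-management"],
    ["organizations", "sso", "identitystore", "iam", "cloudtrail",
     "well-architected", "core-mcp", "well-architected-security"],
    ["cloudwatch", "logs", "xray", "lambda", "cloudwatch-appsignals",
     "lambda-tool", "terraform-mcp", "aws-diagram"] ]

def pvApiGroups : List (List String) :=
  [ ["GetCostAndUsage", "GetCostForecast", "DescribeReportDefinitions",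
     "GetCostCategories", "GetSavingsPlansUtilization"],
    ["ListAccounts", "DescribeOrganization", "ListOrganizationalUnits",
     "ListInstancesForAccessPortal", "GetUser", "CreateTrail"],
    ["PutMetricData", "GetMetricStatistics", "DescribeLogGroups",
     "GetTraceSummaries", "Invoke", "CreateLogGroup"] ]

-- '{s: r for r, group in enumerate(_SERVICE_GROUPS) for s in group}'
def pvServiceRank : PySem.Dict String Nat :=
  PySem.Dict.ofList ((pvEnumerate pvServiceGroups).flatMap (fun p => p.2.map (fun s => (s, p.1))))

-- '[(a, r) for r, group in enumerate(_API_GROUPS) for a in group]'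
def pvApiPatterns : List (String × Nat) :=
  (pvEnumerate pvApiGroups).flatMap (fun p => p.2.map (fun a => (a, p.1)))

def detect_operation_type_py_alt (service_name : Option String) (api_call : Option String) : Option String :=
  let service_lower : String := match service_name with
    | some s => if s.isEmpty then "" else PySem.Str.lower s
    | none => ""
  let api_lower : String := match api_call with
    | some s => if s.isEmpty then "" else s
    | none => ""
  -- rank = _SERVICE_RANK.get(service_lower, 3); then the min-matching-rank loop
  let rank : Nat := pvApiPatterns.foldl
    (fun r p => if PySem.Str.isIn p.1 api_lower then min r p.2 else r)
    (pvServiceRank.getD service_lower 3)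
  -- '_LABELS[rank] if rank < 3 else None' (the index is always in range when rank < 3)
  if rank < 3 then PySem.List.pyGet? pvLabels (rank : Int) else none

-- ===== PRECONDITION & SPEC =====
def Spec_detect_operation_type_py (service_name : Option String) (api_call : Option String) (out : Option String) : Prop := out = detect_operation_type_py_alt service_name api_call
instance (service_name : Option String) (api_call : Option String) (out : Option String) : Decidable (Spec_detect_operation_type_py service_name api_call out) := by unfold Spec_detect_operation_type_py; infer_instance

-- ===== CLAIM (what is proved, stated in full; the proofs are below) =====
def Claim_equal_detect_operation_type_py : Prop := ∀ (service_name : Option String) (api_call : Option String), Dom_detect_operation_type_py service_name api_call → Spec_detect_operation_type_py service_name api_call (detect_operation_type_py service_name api_call)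

-- ===== LEMMAS AND PROOFS =====

-- lookup in a dict whose items are a rank-v segment followed by the rest
theorem pv_getD_mk_segment (l : List String) (v : Nat) (rest : List (String × Nat)) (s : String) (d : Nat) :
    (PySem.Dict.mk (l.map (fun x => (x, v)) ++ rest)).getD s d =
      if l.contains s then v else (PySem.Dict.mk rest).getD s d := by
  induction l with
  | nil => simp
  | cons x xs ih =>
    by_cases h : x = s
    · simp [PySem.Dict.getD_eq_get?_getD, PySem.Dict.get?_mk_cons, h]
    · simp only [List.map_cons, List.cons_append, PySem.Dict.getD_eq_get?_getD,
        PySem.Dict.get?_mk_cons, beq_iff_eq, if_neg h, List.contains_cons]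
      rw [← PySem.Dict.getD_eq_get?_getD, ← PySem.Dict.getD_eq_get?_getD, ih]
      have : (s == x) = false := by simp [Ne.symm h]
      simp [this]

-- the min-rank fold over one segment of patterns all carrying rank v (q is the match test)
theorem pv_foldl_min_segment {A : Type} (l : List A) (q : A → Bool) (v r0 : Nat) :
    (l.map (fun a => (a, v))).foldl
        (fun r p => if q p.1 then min r p.2 else r) r0 =
      if l.any q then min r0 v else r0 := by
  induction l generalizing r0 with
  | nil => simp
  | cons x xs ih =>
    simp only [List.map_cons, List.foldl_cons, List.any_cons]
    by_cases h : q x = true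
    · simp [h, ih]
    · simp [h, ih]

-- the same, specialised to the substring test (so it rewrites first-order)
theorem pv_foldl_min_segment' (l : List String) (al : String) (v r0 : Nat) :
    (l.map (fun a => (a, v))).foldl
        (fun r p => if PySem.Str.isIn p.1 al then min r p.2 else r) r0 =
      if l.any (fun a => PySem.Str.isIn a al) then min r0 v else r0 :=
  pv_foldl_min_segment l (fun a => PySem.Str.isIn a al) v r0

-- lookup when the rank-v segment is the whole dict
theorem pv_getD_mk_map (l : List String) (v : Nat) (s : String) (d : Nat) :
    (PySem.Dict.mk (l.map (fun x => (x, v)))).getD s d =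
      if l.contains s then v else d := by
  rw [← List.append_nil (l.map (fun x => (x, v))), pv_getD_mk_segment]
  simp [PySem.Dict.getD_eq_get?_getD, PySem.Dict.get?]

set_option maxHeartbeats 1000000 in
theorem detect_operation_type_eq (service_name api_call : Option String) :
    detect_operation_type_py service_name api_call = detect_operation_type_py_alt service_name api_call := by
  unfold detect_operation_type_py detect_operation_type_py_alt
  have hdict : pvServiceRank = PySem.Dict.mk
      ((pvEnumerate pvServiceGroups).flatMap (fun p => p.2.map (fun s => (s, p.1)))) := by decide
  have hflat : (pvEnumerate pvServiceGroups).flatMap (fun p => p.2.map (fun s => (s, p.1))) =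
      (["ce", "cur", "budgets", "pricing", "cost-explorer", "billing-cost-management"].map (fun x => (x, 0)))
      ++ ((["organizations", "sso", "identitystore", "iam", "cloudtrail",
          "well-architected", "core-mcp", "well-architected-security"].map (fun x => (x, 1)))
      ++ ((["cloudwatch", "logs", "xray", "lambda", "cloudwatch-appsignals",
          "lambda-tool", "terraform-mcp", "aws-diagram"].map (fun x => (x, 2))))) := by rfl
  have hpats : pvApiPatterns =
      (["GetCostAndUsage", "GetCostForecast", "DescribeReportDefinitions",
        "GetCostCategories", "GetSavingsPlansUtilization"].map (fun a => (a, 0)))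
      ++ ((["ListAccounts", "DescribeOrganization", "ListOrganizationalUnits",
          "ListInstancesForAccessPortal", "GetUser", "CreateTrail"].map (fun a => (a, 1)))
      ++ ((["PutMetricData", "GetMetricStatistics", "DescribeLogGroups",
          "GetTraceSummaries", "Invoke", "CreateLogGroup"].map (fun a => (a, 2))))) := by rfl
  rw [hdict, hflat, hpats]
  simp only [List.foldl_append, pv_foldl_min_segment', pv_getD_mk_segment, pv_getD_mk_map]
  set sl : String := (match service_name with
    | some s => if s.isEmpty then "" else PySem.Str.lower s
    | none => "") with hsl
  set al : String := (match api_call with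
    | some s => if s.isEmpty then "" else s
    | none => "") with hal
  cases h1 : (["ce", "cur", "budgets", "pricing", "cost-explorer", "billing-cost-management"] : List String).contains sl <;>
  cases h2 : (["organizations", "sso", "identitystore", "iam", "cloudtrail",
      "well-architected", "core-mcp", "well-architected-security"] : List String).contains sl <;>
  cases h3 : (["cloudwatch", "logs", "xray", "lambda", "cloudwatch-appsignals",
      "lambda-tool", "terraform-mcp", "aws-diagram"] : List String).contains sl <;>
  cases h4 : (["GetCostAndUsage", "GetCostForecast", "DescribeReportDefinitions",
      "GetCostCategories", "GetSavingsPlansUtilization"] : List String).any (fun a => PySem.Str.isIn a al) <;>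
  cases h5 : (["ListAccounts", "DescribeOrganization", "ListOrganizationalUnits",
      "ListInstancesForAccessPortal", "GetUser", "CreateTrail"] : List String).any (fun a => PySem.Str.isIn a al) <;>
  cases h6 : (["PutMetricData", "GetMetricStatistics", "DescribeLogGroups",
      "GetTraceSummaries", "Invoke", "CreateLogGroup"] : List String).any (fun a => PySem.Str.isIn a al) <;>
  decide

-- ===== VERDICT (by name: the statement is the Claim_ definition above) =====
theorem detect_operation_type_py_spec : Claim_equal_detect_operation_type_py := by
  intro service_name api_call _
  unfold Spec_detect_operation_type_py
  exact detect_operation_type_eq service_name api_call
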